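-- pv_equiv track=rewrite | github.com/lrehmann/gps360-viewer | gps360/driver.py | _sort_ports
-- ===== SOURCE A (Python) =====
-- from typing import Dict, Iterable, Optional
--
-- _PREFERRED_PORT_MARKERS = (
--     "usbmodem",
--     "usbserial",
--     "pl2303",
--     "SLAB_USBtoUART",
--     "wchusbserial",
--     "serial",
-- )
--
-- def _sort_ports(ports: Iterable[str]) -> list[str]:
--     def score(port: str) -> tuple[int, str]:
--         lower = port.lower()
--         for idx, marker in enumerate(_PREFERRED_PORT_MARKERS):
--             if marker.lower() in lower:
--                 return (idx, lower)
--         return (len(_PREFERRED_PORT_MARKERS), lower)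
--
--     return sorted(ports, key=score)
-- ===== SOURCE B (Python) =====
-- _PREFERRED_PORT_MARKERS = (
--     "usbmodem",
--     "usbserial",
--     "pl2303",
--     "SLAB_USBtoUART",
--     "wchusbserial",
--     "serial",
-- )
--
-- def _level(port):
--     low = port.lower()
--     for i, m in enumerate(_PREFERRED_PORT_MARKERS):
--         if m.lower() in low:
--             return i
--     return len(_PREFERRED_PORT_MARKERS)
--
-- def _sort_ports(ports):
--     ports = list(ports)
--     out = []
--     for lvl in range(len(_PREFERRED_PORT_MARKERS) + 1):
--         bucket = [p for p in ports if _level(p) == lvl]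
--         bucket.sort(key=str.lower)
--         out += bucket
--     return out
-- ===== Notes on version B (the rewrite author's own statement) =====
-- stated objective: alternative
-- what changed: Replaces the single stable sort under a (marker-priority-index, lowercase-name) tuple key by a bucket decomposition: for each priority level 0..len(markers) collect that level's ports, sort each bucket stably by lowercase name alone, and concatenate the buckets in level order.
import Mathlib
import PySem

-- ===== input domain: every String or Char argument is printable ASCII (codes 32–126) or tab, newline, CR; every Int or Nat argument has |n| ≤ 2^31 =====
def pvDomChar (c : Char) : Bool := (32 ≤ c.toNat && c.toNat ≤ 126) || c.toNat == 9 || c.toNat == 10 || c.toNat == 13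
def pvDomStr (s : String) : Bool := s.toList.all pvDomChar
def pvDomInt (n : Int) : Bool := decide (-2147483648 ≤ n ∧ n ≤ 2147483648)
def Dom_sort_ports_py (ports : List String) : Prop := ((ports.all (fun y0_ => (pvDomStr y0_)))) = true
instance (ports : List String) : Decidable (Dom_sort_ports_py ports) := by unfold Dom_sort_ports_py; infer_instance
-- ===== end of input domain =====

-- B replaces A's single stable sort under a (marker-index, lowercase-name) tuple key by a
-- level-by-level pass: for each priority level it collects that level's ports, sorts them
-- stably by the lowercase name alone, and concatenates (an 'alternative' decomposition).

-- ===== PORT A =====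
def pvMarkers : List String :=
  ["usbmodem", "usbserial", "pl2303", "SLAB_USBtoUART", "wchusbserial", "serial"]

-- the 'for idx, marker in enumerate(...)' loop of A's score, idx as accumulator
def pvScoreAux : List String → Int → String → Int × String
  | [], idx, low => (idx, low)
  | m :: ms, idx, low =>
      if PySem.Str.isIn (PySem.Str.lower m) low then (idx, low)
      else pvScoreAux ms (idx + 1) low

def pvScore (port : String) : Int × String :=
  pvScoreAux pvMarkers 0 (PySem.Str.lower port)

def sort_ports_py (ports : List String) : List String :=
  PySem.List.sorted2 ports (fun p => (pvScore p).1) (fun p => (pvScore p).2) false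

-- ===== PORT B =====
-- B's _level: index of the first matching marker, else the number of markers
def pvLevelAux : List String → String → Nat
  | [], _ => 0
  | m :: ms, low =>
      if PySem.Str.isIn (PySem.Str.lower m) low then 0
      else pvLevelAux ms low + 1

def pvLevel (port : String) : Nat := pvLevelAux pvMarkers (PySem.Str.lower port)

def sort_ports_py_alt (ports : List String) : List String :=
  (PySem.List.pyRange 0 (PySem.List.len pvMarkers + 1) 1).foldl
    (fun out lvl =>
      out ++ PySem.List.sorted
        (ports.filter (fun p => ((pvLevel p : Int) == lvl)))
        (fun p => PySem.Str.lower p) false)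
    []

-- ===== PRECONDITION & SPEC =====
def Spec_sort_ports_py (ports : List String) (out : List String) : Prop := out = sort_ports_py_alt ports
instance (ports : List String) (out : List String) : Decidable (Spec_sort_ports_py ports out) := by unfold Spec_sort_ports_py; infer_instance

-- ===== CLAIM (what is proved, stated in full; the proofs are below) =====
def Claim_equal_sort_ports_py : Prop := ∀ (ports : List String), Dom_sort_ports_py ports → Spec_sort_ports_py ports (sort_ports_py ports)

-- ===== LEMMAS AND PROOFS =====

-- insertBy skips a prefix on which the comparison rejects
lemma pv_insertBy_append_false {α : Type} (before : α → α → Bool) (x : α)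
    (pre rest : List α) (h : ∀ a ∈ pre, before x a = false) :
    PySem.List.insertBy before x (pre ++ rest) = pre ++ PySem.List.insertBy before x rest := by
  induction pre with
  | nil => simp
  | cons a pre ih =>
      have ha : before x a = false := h a (by simp)
      simp [PySem.List.insertBy, ha, ih (fun b hb => h b (by simp [hb]))]

-- insertBy lands inside the middle block when everything after it accepts,
-- and there it agrees with the simpler comparison
lemma pv_insertBy_append_congr {α : Type} (before before' : α → α → Bool) (x : α)
    (mid post : List α) (hpost : ∀ b ∈ post, before x b = true)
    (hmid : ∀ a ∈ mid, before x a = before' x a) :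
    PySem.List.insertBy before x (mid ++ post) =
      PySem.List.insertBy before' x mid ++ post := by
  induction mid with
  | nil =>
      cases post with
      | nil => simp [PySem.List.insertBy]
      | cons b post =>
          have hb : before x b = true := hpost b (by simp)
          simp [PySem.List.insertBy, hb]
  | cons a mid ih =>
      have ha : before x a = before' x a := hmid a (by simp)
      by_cases hb : before' x a = true
      · simp [PySem.List.insertBy, ha, hb]
      · simp only [Bool.not_eq_true] at hb
        simp [PySem.List.insertBy, ha, hb,
          ih (fun b hb => hmid b (by simp [hb]))]

lemma pv_sorted_append_singleton {α κ : Type} [LT κ] [DecidableLT κ]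
    (ys : List α) (x : α) (key : α → κ) :
    PySem.List.sorted (ys ++ [x]) key false =
      PySem.List.insertBy (fun a b => decide (key a < key b)) x
        (PySem.List.sorted ys key false) := by
  rw [PySem.List.sorted_eq_foldl_insertBy, PySem.List.sorted_eq_foldl_insertBy,
    List.foldl_append]
  rfl

-- the bucket decomposition of the stable lexicographic-tuple sort: sorting by the tuple key
-- (k1, k2) equals concatenating, level by level, the stable k2-sorts of the k1-buckets
lemma pv_foldl_insertBy_lex {α : Type} (k1 : α → Int) (k2 : α → String) :
    ∀ (xs : List α) (levels : List Int), levels.Pairwise (· < ·) →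
    (∀ x ∈ xs, k1 x ∈ levels) →
    xs.foldl (fun acc x =>
        PySem.List.insertBy
          (fun a b => decide (k1 a < k1 b) || (!decide (k1 b < k1 a) && decide (k2 a < k2 b)))
          x acc) [] =
      levels.flatMap (fun v =>
        PySem.List.sorted (xs.filter (fun x => k1 x == v)) k2 false) := by
  intro xs
  induction xs using List.reverseRecOn with
  | nil => intro levels _ _; simp [PySem.List.sorted]
  | append_singleton qs x ih =>
      intro levels hpw hmem
      rw [List.foldl_append]
      simp only [List.foldl]
      rw [ih levels hpw (fun y hy => hmem y (by simp [hy]))]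
      have hx : k1 x ∈ levels := hmem x (by simp)
      obtain ⟨pre, post, rfl⟩ := List.append_of_mem hx
      rw [List.pairwise_append] at hpw
      obtain ⟨hpw1, hpw2, hcross⟩ := hpw
      have hpre : ∀ w ∈ pre, w < k1 x := fun w hw => hcross w hw (k1 x) (by simp)
      have hpost : ∀ w ∈ post, k1 x < w := fun w hw => (List.pairwise_cons.1 hpw2).1 w hw
      have hmemg : ∀ (l : List α) (w : Int) a,
          a ∈ PySem.List.sorted (l.filter (fun y => k1 y == w)) k2 false → k1 a = w := by
        intro l w a ha
        rw [PySem.List.mem_sorted] at ha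
        have := List.mem_filter.1 ha
        exact beq_iff_eq.1 this.2
      simp only [List.flatMap_append, List.flatMap_cons]
      rw [pv_insertBy_append_false]
      · rw [pv_insertBy_append_congr
            (before' := fun a b => decide (k2 a < k2 b))]
        · rw [← pv_sorted_append_singleton]
          have hmain : qs.filter (fun y => k1 y == k1 x) ++ [x] =
              (qs ++ [x]).filter (fun y => k1 y == k1 x) := by
            simp [List.filter_append]
          rw [hmain]
          have hpre' : pre.flatMap (fun v =>
              PySem.List.sorted ((qs ++ [x]).filter (fun y => k1 y == v)) k2 false) =
              pre.flatMap (fun v =>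
              PySem.List.sorted (qs.filter (fun y => k1 y == v)) k2 false) := by
            apply List.flatMap_congr
            intro w hw
            have : (k1 x == w) = false := by
              simp; have := hpre w hw; omega
            simp [List.filter_append, this]
          have hpost' : post.flatMap (fun v =>
              PySem.List.sorted ((qs ++ [x]).filter (fun y => k1 y == v)) k2 false) =
              post.flatMap (fun v =>
              PySem.List.sorted (qs.filter (fun y => k1 y == v)) k2 false) := by
            apply List.flatMap_congr
            intro w hw
            have : (k1 x == w) = false := by
              simp; have := hpost w hw; omega
            simp [List.filter_append, this]
          rw [hpre', hpost']
        · intro b hb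
          obtain ⟨w, hw, hbw⟩ := List.mem_flatMap.1 hb
          have hk : k1 b = w := hmemg qs w b hbw
          have : k1 x < k1 b := by rw [hk]; exact hpost w hw
          simp [this]
        · intro a ha
          have hk : k1 a = k1 x := hmemg qs (k1 x) a ha
          simp [hk]
      · intro a ha
        obtain ⟨w, hw, haw⟩ := List.mem_flatMap.1 ha
        have hk : k1 a = w := hmemg qs w a haw
        have h1 : ¬ (k1 x < k1 a) := by have := hpre w hw; omega
        have h2 : k1 a < k1 x := by have := hpre w hw; omega
        simp [h1, h2]

-- pvScoreAux is (start index + first-match offset, the lowered string)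
lemma pv_scoreAux_eq (ms : List String) (idx : Int) (low : String) :
    pvScoreAux ms idx low = (idx + (pvLevelAux ms low : Int), low) := by
  induction ms generalizing idx with
  | nil => simp [pvScoreAux, pvLevelAux]
  | cons m ms ih =>
      by_cases h : PySem.Chars.isIn (PySem.Chars.lower m.toList) low.toList = true
      · simp [pvScoreAux, pvLevelAux, h]
      · simp only [Bool.not_eq_true] at h
        simp [pvScoreAux, pvLevelAux, h, ih]
        omega

lemma pv_levelAux_le (ms : List String) (low : String) :
    pvLevelAux ms low ≤ ms.length := by
  induction ms with
  | nil => simp [pvLevelAux]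
  | cons m ms ih =>
      by_cases h : PySem.Chars.isIn (PySem.Chars.lower m.toList) low.toList = true
      · simp [pvLevelAux, h]
      · simp only [Bool.not_eq_true] at h
        simp [pvLevelAux, h]
        omega

-- ===== VERDICT (by name: the statement is the Claim_ definition above) =====
theorem sort_ports_py_spec : Claim_equal_sort_ports_py := by
  intro ports _
  unfold Spec_sort_ports_py sort_ports_py sort_ports_py_alt
  have hA : PySem.List.sorted2 ports (fun p => (pvScore p).1) (fun p => (pvScore p).2) false =
      ports.foldl (fun acc x =>
        PySem.List.insertBy
          (fun a b => decide ((pvScore a).1 < (pvScore b).1) ||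
            (!decide ((pvScore b).1 < (pvScore a).1) && decide ((pvScore a).2 < (pvScore b).2)))
          x acc) [] := rfl
  rw [hA]
  rw [pv_foldl_insertBy_lex (fun p => (pvScore p).1) (fun p => (pvScore p).2) ports
      [0, 1, 2, 3, 4, 5, 6]
      (by decide)
      (by
        intro p _
        have h1 := pv_levelAux_le pvMarkers (PySem.Str.lower p)
        simp [pvScore, pv_scoreAux_eq, pvMarkers] at h1 ⊢
        omega)]
  have hr : PySem.List.pyRange 0 (PySem.List.len pvMarkers + 1) 1 =
      [0, 1, 2, 3, 4, 5, 6] := by decide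
  rw [hr, PySem.List.foldl_append_eq_flatMap]
  rw [List.nil_append]
  apply List.flatMap_congr
  intro v _
  simp [pvScore, pv_scoreAux_eq, pvLevel]
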